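-- pv_equiv track=rewrite | github.com/degencap777/python2Rust | python_src/utils/numerals.py | split_array_into_contiguous_ranges
-- ===== SOURCE A (Python) =====
-- def split_array_into_contiguous_ranges(sorted_array: list[int]) -> list[list[int]]:
--     ranges = []
--     range = []
--     previous = -1
--     for current in sorted_array:
--         if previous+1 != current:            # end of previous subList and beginning of next
--             if range:              # if subList already has elements
--                 ranges.append(range)
--                 range = []
--         range.append(current)
--         previous = current
--     if range:
--         ranges.append(range)
--     return ranges
-- ===== SOURCE B (Python) =====
-- def split_array_into_contiguous_ranges(sorted_array: list[int]) -> list[list[int]]: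
--     # Build the groups back-to-front: walk the array in reverse, prepending logically;
--     # physically each group and the group list are built with O(1) appends and
--     # reversed once at the end.
--     out = []  # groups in reverse order, each group's elements in reverse order
--     for x in reversed(sorted_array):
--         if out and x + 1 == out[-1][-1]:
--             out[-1].append(x)
--         else:
--             out.append([x])
--     out.reverse()
--     for g in out:
--         g.reverse()
--     return out
-- ===== Notes on version B (the rewrite author's own statement) =====
-- stated objective: alternative
-- what changed: B builds the groups back-to-front: it walks the array in reverse, extending the current run while the predecessor is one less, then reverses the group list and each group, instead of A's forward pass with a separate buffer, a 'previous' sentinel and manual flushing.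
import Mathlib
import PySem

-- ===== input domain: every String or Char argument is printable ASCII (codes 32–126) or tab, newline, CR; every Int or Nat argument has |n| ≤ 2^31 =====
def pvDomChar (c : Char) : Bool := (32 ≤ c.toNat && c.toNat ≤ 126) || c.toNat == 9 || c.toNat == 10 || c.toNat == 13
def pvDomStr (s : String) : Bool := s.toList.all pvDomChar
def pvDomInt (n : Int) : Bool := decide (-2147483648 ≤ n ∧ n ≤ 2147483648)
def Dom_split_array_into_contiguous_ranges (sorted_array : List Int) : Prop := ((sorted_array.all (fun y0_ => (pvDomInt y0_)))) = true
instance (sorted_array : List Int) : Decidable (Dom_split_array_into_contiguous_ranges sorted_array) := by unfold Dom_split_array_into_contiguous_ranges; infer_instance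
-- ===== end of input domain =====

-- B builds the result back-to-front (reverse walk with O(1) appends, reversed once at the end)
-- instead of A's forward pass with a buffer, a 'previous' sentinel and manual flushing; same cost.


-- ===== PORT A =====
-- one loop step of A: state = (ranges, range, previous)
def pvStepA (s : List (List Int) × List Int × Int) (current : Int) :
    List (List Int) × List Int × Int :=
  let (ranges, range, previous) := s
  if previous + 1 ≠ current then
    if range ≠ [] then (ranges ++ [range], [current], current)
    else (ranges, [current], current)
  else (ranges, range ++ [current], current)

def split_array_into_contiguous_ranges (sorted_array : List Int) : List (List Int) :=
  let s := sorted_array.foldl pvStepA ([], [], -1)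
  if s.2.1 ≠ [] then s.1 ++ [s.2.1] else s.1

-- ===== PORT B =====
-- one loop step of B: `if out and x + 1 == out[-1][-1]: out[-1].append(x) else: out.append([x])`
-- (the inner `none` case is Python's out[-1][-1] on an empty group, which never occurs)
def pvStepB (out : List (List Int)) (x : Int) : List (List Int) :=
  match out.getLast? with
  | some g =>
    match g.getLast? with
    | some y => if x + 1 = y then out.dropLast ++ [g ++ [x]] else out ++ [[x]]
    | none => out ++ [[x]]
  | none => out ++ [[x]]

def split_array_into_contiguous_ranges_alt (sorted_array : List Int) : List (List Int) :=
  let out := sorted_array.reverse.foldl pvStepB []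
  out.reverse.map List.reverse

-- ===== PRECONDITION & SPEC =====
def Spec_split_array_into_contiguous_ranges (sorted_array : List Int) (out : List (List Int)) : Prop := out = split_array_into_contiguous_ranges_alt sorted_array
instance (sorted_array : List Int) (out : List (List Int)) : Decidable (Spec_split_array_into_contiguous_ranges sorted_array out) := by unfold Spec_split_array_into_contiguous_ranges; infer_instance

-- ===== CLAIM (what is proved, stated in full; the proofs are below) =====
def Claim_equal_split_array_into_contiguous_ranges : Prop := ∀ (sorted_array : List Int), Dom_split_array_into_contiguous_ranges sorted_array → Spec_split_array_into_contiguous_ranges sorted_array (split_array_into_contiguous_ranges sorted_array)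

-- ===== LEMMAS AND PROOFS =====

-- reference recursive characterisation of the grouping, shared by both proofs
def pvGroups : List Int → List (List Int)
  | [] => []
  | x :: xs =>
    match pvGroups xs with
    | (y :: g) :: gs => if x + 1 = y then (x :: y :: g) :: gs else [x] :: (y :: g) :: gs
    | _ => [[x]]

theorem pvGroups_ne_nil : ∀ (xs : List Int), ([] : List Int) ∉ pvGroups xs := by
  intro xs
  induction xs with
  | nil => simp [pvGroups]
  | cons x xs ih =>
    simp only [pvGroups]
    rcases h : pvGroups xs with _ | ⟨g, gs⟩
    · simp
    · rcases g with _ | ⟨y, g⟩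
      · simp
      · rw [h] at ih
        dsimp only
        split_ifs <;> simp_all

theorem pvGroups_head : ∀ (x : Int) (xs : List Int),
    ∃ t gs, pvGroups (x :: xs) = (x :: t) :: gs := by
  intro x xs
  simp only [pvGroups]
  rcases pvGroups xs with _ | ⟨g, gs⟩
  · exact ⟨[], [], rfl⟩
  · rcases g with _ | ⟨y, g⟩
    · exact ⟨[], [], rfl⟩
    · dsimp only
      split_ifs <;> exact ⟨_, _, rfl⟩

-- how A's pending buffer `range` (with its `previous` value) merges with the groups of the rest
def pvGlue (range : List Int) (prev : Int) (gs : List (List Int)) : List (List Int) :=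
  if range = [] then gs
  else
    match gs with
    | (y :: g) :: rest => if prev + 1 = y then (range ++ y :: g) :: rest else range :: gs
    | _ => [range]

theorem pvGlue_fresh (x : Int) (xs : List Int) :
    pvGlue [x] x (pvGroups xs) = pvGroups (x :: xs) := by
  simp only [pvGlue, pvGroups]
  rcases h : pvGroups xs with _ | ⟨g, gs⟩
  · rfl
  · rcases g with _ | ⟨y, g⟩
    · exact absurd (h ▸ List.mem_cons_self) (pvGroups_ne_nil xs)
    · split_ifs <;> simp_all

theorem pvFoldA_inv : ∀ (xs : List Int) (ranges : List (List Int)) (range : List Int) (prev : Int),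
    (let s := xs.foldl pvStepA (ranges, range, prev)
     if s.2.1 ≠ [] then s.1 ++ [s.2.1] else s.1)
      = ranges ++ pvGlue range prev (pvGroups xs) := by
  intro xs
  induction xs with
  | nil =>
    intro ranges range prev
    simp only [List.foldl_nil, pvGroups, pvGlue]
    split_ifs <;> simp_all
  | cons x xs ih =>
    intro ranges range prev
    simp only [List.foldl_cons]
    by_cases hpx : prev + 1 = x
    · -- x continues the buffer
      have hstep : pvStepA (ranges, range, prev) x = (ranges, range ++ [x], x) := by
        simp [pvStepA, hpx]
      rw [hstep, ih]
      congr 1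
      -- pvGlue (range ++ [x]) x (pvGroups xs) = pvGlue range prev (pvGroups (x :: xs))
      simp only [pvGroups, pvGlue]
      rcases h : pvGroups xs with _ | ⟨g, gs⟩
      · split_ifs <;> simp_all
      · rcases g with _ | ⟨y, g⟩
        · exact absurd (h ▸ List.mem_cons_self) (pvGroups_ne_nil xs)
        · by_cases hxy : x + 1 = y <;> split_ifs <;> simp_all
    · -- break: buffer (if any) is flushed, x starts a new run
      obtain ⟨t, gs, hg⟩ := pvGroups_head x xs
      by_cases hr : range = []
      · have hstep : pvStepA (ranges, range, prev) x = (ranges, [x], x) := by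
          simp [pvStepA, hpx, hr]
        rw [hstep, ih, pvGlue_fresh]
        simp [pvGlue, hr]
      · have hstep : pvStepA (ranges, range, prev) x = (ranges ++ [range], [x], x) := by
          simp [pvStepA, hpx, hr]
        rw [hstep, ih, pvGlue_fresh]
        simp only [pvGlue, hr, hg]
        have : ¬ prev + 1 = x := hpx
        simp_all

theorem pvFoldB_inv : ∀ (xs : List Int),
    xs.reverse.foldl pvStepB [] = ((pvGroups xs).map List.reverse).reverse := by
  intro xs
  induction xs with
  | nil => simp [pvGroups]
  | cons x xs ih =>
    rw [List.reverse_cons, List.foldl_append, ih]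
    simp only [List.foldl_cons, List.foldl_nil, pvGroups]
    rcases h : pvGroups xs with _ | ⟨g, gs⟩
    · simp [pvStepB]
    · rcases g with _ | ⟨y, g⟩
      · exact absurd (h ▸ List.mem_cons_self) (pvGroups_ne_nil xs)
      · simp only [List.map_cons, List.reverse_cons, pvStepB,
          List.getLast?_append]
        by_cases hxy : x + 1 = y
        · simp [hxy]
        · simp [hxy]

theorem pvPortA_eq (xs : List Int) : split_array_into_contiguous_ranges xs = pvGroups xs := by
  have := pvFoldA_inv xs [] [] (-1)
  simpa [split_array_into_contiguous_ranges, pvGlue] using this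

theorem pvPortB_eq (xs : List Int) : split_array_into_contiguous_ranges_alt xs = pvGroups xs := by
  unfold split_array_into_contiguous_ranges_alt
  rw [pvFoldB_inv]
  simp [List.map_map]

-- ===== VERDICT (by name: the statement is the Claim_ definition above) =====
theorem split_array_into_contiguous_ranges_spec : Claim_equal_split_array_into_contiguous_ranges := by
  intro xs _
  unfold Spec_split_array_into_contiguous_ranges
  rw [pvPortA_eq, pvPortB_eq]
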